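-- pv_equiv track=rewrite | github.com/sunmingtao/sample-code | python/projecteuler/p153.py | find_imaginary_solution_num
-- ===== SOURCE A (Python) =====
-- import math
--
-- def find_max_ij(k):
--     return int(math.sqrt(k-1))
--
-- def sum_mod(n):
--     half_n = (n + 1) // 2
--     return n * n - sum(n % i for i in range(1, n // 2 + 1)) - (half_n * (half_n - 1)) // 2
--
-- sum_mod_cache = {}
--
-- def find_imaginary_num_from_root_ij(upper_limit, root_i, root_j):
--     num = upper_limit // (root_i ** 2 + root_j ** 2)
--     if num not in sum_mod_cache:
--         sum_mod_cache[num] = sum_mod(num)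
--     if root_i == root_j:
--         return sum_mod_cache[num] * 2 * root_i
--     else:
--         return sum_mod_cache[num] * 2 * (root_i + root_j)
--
-- def find_imaginary_solution_num(upper_limit):
--     imaginary_total = 0
--     for i in range(1, find_max_ij(upper_limit) + 1):
--         for j in range(1, i+1):
--             if math.gcd(i, j) == 1:
--                 if i ** 2 + j ** 2 > upper_limit:
--                     break
--                 else:
--                     imaginary_value = find_imaginary_num_from_root_ij(upper_limit, i, j)
--                     imaginary_total += imaginary_value
--                     #print (i, j, imaginary_value)
--     return imaginary_total
-- ===== SOURCE B (Python) =====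
-- import math
--
-- def find_imaginary_solution_num(upper_limit):
--     def block_sigma(n):
--         # S(n) = sum_{d=1}^{n} d * (n // d), grouping d's with equal quotient n // d
--         total = 0
--         d = 1
--         while d <= n:
--             q = n // d
--             last = n // q
--             total += q * (d + last) * (last - d + 1) // 2
--             d = last + 1
--         return total
--
--     cache = {}
--     total = 0
--     for j in range(1, math.isqrt(upper_limit // 2) + 1):
--         for i in range(j, math.isqrt(upper_limit - j * j) + 1):
--             if math.gcd(i, j) == 1:
--                 num = upper_limit // (i * i + j * j)
--                 if num not in cache:
--                     cache[num] = block_sigma(num)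
--                 total += cache[num] * (2 * i if i == j else 2 * (i + j))
--     return total
-- ===== Notes on version B (the rewrite author's own statement) =====
-- stated objective: faster
-- what changed: The O(n) loop computing sum_{d<=n} d*floor(n/d) (A's sum_mod via summing n%i over all i<=n//2) is replaced by the standard divisor-block (quotient-grouping) method which is O(sqrt(n)) per call, and the coprime-pair enumeration is driven by exact integer-sqrt bounds (j outer, i inner from j) instead of A's triangular i/j loops with a break.
-- outside the precondition, e.g. on find_imaginary_solution_num(0): A raises ValueError, B returns 0
import Mathlib
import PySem

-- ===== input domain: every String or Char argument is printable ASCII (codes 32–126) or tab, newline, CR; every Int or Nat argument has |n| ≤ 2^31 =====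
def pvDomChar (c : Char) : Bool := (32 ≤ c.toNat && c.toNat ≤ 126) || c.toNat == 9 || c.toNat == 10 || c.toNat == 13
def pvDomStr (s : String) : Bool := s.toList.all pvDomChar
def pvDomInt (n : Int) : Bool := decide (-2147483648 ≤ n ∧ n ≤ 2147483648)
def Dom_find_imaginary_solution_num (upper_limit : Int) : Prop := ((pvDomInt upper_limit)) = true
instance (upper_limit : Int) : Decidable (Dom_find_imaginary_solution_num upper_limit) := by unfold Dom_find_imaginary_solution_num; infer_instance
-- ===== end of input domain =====

-- B replaces A's linear loop for Σ_{d≤n} d·⌊n/d⌋ (A's sum_mod sums n % i over all i ≤ n//2) by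
-- divisor-block (quotient-grouping) summation, and enumerates the coprime pairs with exact isqrt
-- bounds (j outer, i from j) instead of A's triangular loops with a break.
-- A's global sum_mod_cache (and B's local cache) are pure memoization and are ported as the call
-- itself: the return value is unaffected; A's cross-call mutation of that global dict is not modelled.

-- ===== PORT A =====
-- int(math.sqrt(k-1)): the float sqrt is exact as an integer sqrt for 0 ≤ k-1 ≤ 2^31;
-- for k ≤ 0 Python raises ValueError — excluded by Pre_.
def find_max_ij (k : Int) : Int := ((k - 1).toNat.sqrt : Int)

-- local half_n = (n+1)//2 inlined (it is used twice, unchanged)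
def sum_mod (n : Int) : Int :=
  n * n
    - ((PySem.List.pyRange 1 (PySem.Int.floordiv n 2 + 1) 1).map (fun i => PySem.Int.mod n i)).sum
    - PySem.Int.floordiv (PySem.Int.floordiv (n + 1) 2 * (PySem.Int.floordiv (n + 1) 2 - 1)) 2

-- sum_mod_cache is pure memoization of sum_mod: the cached lookup is ported as the call itself
def find_imaginary_num_from_root_ij (upper_limit root_i root_j : Int) : Int :=
  let num := PySem.Int.floordiv upper_limit (root_i ^ 2 + root_j ^ 2)
  if root_i == root_j then sum_mod num * 2 * root_i else sum_mod num * 2 * (root_i + root_j)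

-- the inner 'for j' loop of A, with its break
def innerA (upper_limit i : Int) : List Int → Int → Int
  | [], acc => acc
  | j :: rest, acc =>
    if Int.gcd i j == 1 then
      if i ^ 2 + j ^ 2 > upper_limit then acc
      else innerA upper_limit i rest (acc + find_imaginary_num_from_root_ij upper_limit i j)
    else innerA upper_limit i rest acc

def find_imaginary_solution_num (upper_limit : Int) : Int :=
  (PySem.List.pyRange 1 (find_max_ij upper_limit + 1) 1).foldl
    (fun acc i => innerA upper_limit i (PySem.List.pyRange 1 (i + 1) 1) acc) 0

-- ===== PORT B =====
-- 'while d <= n' ported with a fuel counter (d grows by at least 1 each pass, so n.toNat + 1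
-- passes always suffice and the fuel-0 branch is never taken from blockSigma); the conjunct
-- 1 ≤ d is a totality guard only (d starts at 1 and only grows); the locals q = n//d and
-- last = n//q are inlined.
def blockSigmaGo : Nat → Int → Int → Int → Int
  | 0, _, _, total => total
  | Nat.succ fuel, n, d, total =>
    if 1 ≤ d ∧ d ≤ n then
      blockSigmaGo fuel n (PySem.Int.floordiv n (PySem.Int.floordiv n d) + 1)
        (total + PySem.Int.floordiv
          (PySem.Int.floordiv n d * (d + PySem.Int.floordiv n (PySem.Int.floordiv n d))
            * (PySem.Int.floordiv n (PySem.Int.floordiv n d) - d + 1)) 2)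
    else total

def blockSigma (n : Int) : Int := blockSigmaGo (n.toNat + 1) n 1 0

-- math.isqrt → Nat.sqrt (exact for a nonneg argument; a negative argument raises in Python,
-- which happens only for upper_limit ≤ 0 — excluded by Pre_); the cache ported as the call itself.
def find_imaginary_solution_num_alt (upper_limit : Int) : Int :=
  (PySem.List.pyRange 1 (((PySem.Int.floordiv upper_limit 2).toNat.sqrt : Int) + 1) 1).foldl
    (fun acc j =>
      (PySem.List.pyRange j (((upper_limit - j * j).toNat.sqrt : Int) + 1) 1).foldl
        (fun acc2 i =>
          if Int.gcd i j == 1 then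
            acc2 + blockSigma (PySem.Int.floordiv upper_limit (i * i + j * j))
              * (if i == j then 2 * i else 2 * (i + j))
          else acc2) acc) 0

-- ===== PRECONDITION & SPEC =====
-- A raises ValueError (math.sqrt of a negative number) for upper_limit ≤ 0; those inputs are excluded.
def Pre_find_imaginary_solution_num (upper_limit : Int) : Prop := 1 ≤ upper_limit
instance (upper_limit : Int) : Decidable (Pre_find_imaginary_solution_num upper_limit) := by
  unfold Pre_find_imaginary_solution_num; infer_instance
def pvWitness_find_imaginary_solution_num : Int := 10

def Spec_find_imaginary_solution_num (upper_limit : Int) (out : Int) : Prop :=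
  out = find_imaginary_solution_num_alt upper_limit
instance (upper_limit : Int) (out : Int) : Decidable (Spec_find_imaginary_solution_num upper_limit out) := by
  unfold Spec_find_imaginary_solution_num; infer_instance

-- ===== CLAIM (what is proved, stated in full; the proofs are below) =====
def Claim_equal_find_imaginary_solution_num : Prop := ∀ (upper_limit : Int), Dom_find_imaginary_solution_num upper_limit → Pre_find_imaginary_solution_num upper_limit → Spec_find_imaginary_solution_num upper_limit (find_imaginary_solution_num upper_limit)


-- ===== LEMMAS AND PROOFS =====

-- the common value both programs compute per quotient: S n = Σ_{d=1}^n d·⌊n/d⌋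
noncomputable def SM (n : Int) : Int := ∑ d ∈ Finset.Icc 1 n, d * (n / d)

-- the contribution of the pair (i, j) (with j ≤ i), common spec of both double loops
noncomputable def gTerm (L i j : Int) : Int :=
  if Int.gcd i j = 1 ∧ i * i + j * j ≤ L then
    SM (L / (i * i + j * j)) * (if i = j then 2 * i else 2 * (i + j))
  else 0

-- the common outer bound used to compare the two enumerations
def NL (L : Int) : Int := (L.toNat.sqrt : Int)

theorem Icc_eq_Ioc (a b : Int) : Finset.Icc a b = Finset.Ioc (a - 1) b := by
  ext x; simp only [Finset.mem_Icc, Finset.mem_Ioc]; omega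

theorem Icc_succ_eq_Ioc (a b : Int) : Finset.Icc (a + 1) b = Finset.Ioc a b := by
  ext x; simp only [Finset.mem_Icc, Finset.mem_Ioc]; omega

theorem Icc_insert_bot (a b : Int) (h : a ≤ b) : Finset.Icc a b = insert a (Finset.Icc (a + 1) b) := by
  ext x; simp only [Finset.mem_Icc, Finset.mem_insert]; omega

theorem sum_Icc_split (f : Int → Int) (a b c : Int) (hab : a - 1 ≤ b) (hbc : b ≤ c) :
    (∑ x ∈ Finset.Icc a b, f x) + (∑ x ∈ Finset.Icc (b + 1) c, f x) = ∑ x ∈ Finset.Icc a c, f x := by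
  rw [Icc_eq_Ioc a b, Icc_succ_eq_Ioc, Icc_eq_Ioc a c]
  rw [← Finset.Ioc_union_Ioc_eq_Ioc hab hbc, Finset.sum_union ?hd]
  case hd =>
    apply Finset.disjoint_left.2
    intro x hx hx'
    simp only [Finset.mem_Ioc] at hx hx'
    omega

theorem one_le_sq (i : Int) (h : 1 ≤ i) : 1 ≤ i * i := by nlinarith

theorem sum_pyRange_map_aux (k : Nat) : ∀ (f : Int → Int) (a b : Int), (b - a).toNat ≤ k →
    ((PySem.List.pyRange a b 1).map f).sum = ∑ x ∈ Finset.Icc a (b - 1), f x := by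
  induction k with
  | zero =>
    intro f a b hk
    rw [PySem.List.pyRange_one_eq_nil (by omega)]
    have he : Finset.Icc a (b - 1) = ∅ := Finset.Icc_eq_empty (by omega)
    simp [he]
  | succ k ih =>
    intro f a b hk
    by_cases hab : a < b
    · have hb : a ≤ b - 1 := by omega
      have hsplit : PySem.List.pyRange a b 1 = PySem.List.pyRange a (b - 1) 1 ++ [b - 1] := by
        have h := PySem.List.pyRange_one_succ_right (a := a) (b := b - 1) hb
        simpa using h
      rw [hsplit, List.map_append, List.sum_append, ih f a (b - 1) (by omega)]
      simp only [List.map_cons, List.map_nil, List.sum_cons, List.sum_nil, add_zero]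
      have hins : Finset.Icc a (b - 1) = insert (b - 1) (Finset.Icc a (b - 1 - 1)) := by
        ext x; simp only [Finset.mem_Icc, Finset.mem_insert]; omega
      rw [hins, Finset.sum_insert (by simp only [Finset.mem_Icc, not_and, not_le]; omega)]
      ring
    · rw [PySem.List.pyRange_one_eq_nil (by omega)]
      have he : Finset.Icc a (b - 1) = ∅ := Finset.Icc_eq_empty (by omega)
      simp [he]

theorem sum_pyRange_map (f : Int → Int) (a b : Int) :
    ((PySem.List.pyRange a b 1).map f).sum = ∑ x ∈ Finset.Icc a (b - 1), f x :=
  sum_pyRange_map_aux (b - a).toNat f a b le_rfl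

theorem gauss2_aux (k : Nat) : ∀ (a b : Int), (b + 1 - a).toNat ≤ k → a ≤ b + 1 →
    (∑ e ∈ Finset.Icc a b, e) * 2 = (a + b) * (b - a + 1) := by
  induction k with
  | zero =>
    intro a b hk hab
    have he : Finset.Icc a b = ∅ := Finset.Icc_eq_empty (by omega)
    rw [he, Finset.sum_empty]
    have h0 : b - a + 1 = 0 := by omega
    rw [h0]; ring
  | succ k ih =>
    intro a b hk hab
    by_cases hb : a ≤ b
    · have hins : Finset.Icc a b = insert b (Finset.Icc a (b - 1)) := by
        ext x; simp only [Finset.mem_Icc, Finset.mem_insert]; omega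
      have hnm : b ∉ Finset.Icc a (b - 1) := by simp only [Finset.mem_Icc, not_and, not_le]; omega
      rw [hins, Finset.sum_insert hnm]
      have hrec := ih a (b - 1) (by omega) (by omega)
      linear_combination hrec
    · have he : Finset.Icc a b = ∅ := Finset.Icc_eq_empty (by omega)
      rw [he, Finset.sum_empty]
      have h0 : b - a + 1 = 0 := by omega
      rw [h0]; ring

theorem gauss2 (a b : Int) (hab : a ≤ b + 1) :
    (∑ e ∈ Finset.Icc a b, e) * 2 = (a + b) * (b - a + 1) :=
  gauss2_aux (b + 1 - a).toNat a b le_rfl hab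

theorem blockSigma_le_step (n d : Int) (h1 : 1 ≤ d) (h2 : d ≤ n) :
    d ≤ PySem.Int.floordiv n (PySem.Int.floordiv n d) := by
  have hd : (0:Int) < d := by omega
  have hq : 1 ≤ PySem.Int.floordiv n d := by
    rw [PySem.Int.le_floordiv_iff_mul_le (by omega : (0:Int) < d)]; omega
  have hmul : PySem.Int.floordiv n d * d ≤ n := by
    have h3 := PySem.Int.floordiv_mul_add_mod n d
    have h4 := PySem.Int.mod_nonneg n hd
    omega
  rw [PySem.Int.le_floordiv_iff_mul_le (by omega : (0:Int) < PySem.Int.floordiv n d)]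
  calc d * PySem.Int.floordiv n d = PySem.Int.floordiv n d * d := by ring
    _ ≤ n := hmul

theorem ediv_block_const (n d e : Int) (hd : 1 ≤ d) (hdn : d ≤ n) (hde : d ≤ e)
    (hel : e ≤ n / (n / d)) : n / e = n / d := by
  have hd0 : (0:Int) < d := by omega
  have he0 : (0:Int) < e := by omega
  have hq1 : 1 ≤ n / d := (Int.le_ediv_iff_mul_le hd0).2 (by omega)
  have hq0 : (0:Int) < n / d := by omega
  have heq : e * (n / d) ≤ n := (Int.le_ediv_iff_mul_le hq0).1 hel
  have hlow : n / d ≤ n / e := (Int.le_ediv_iff_mul_le he0).2 (by linarith [heq])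
  have hup : n / e ≤ n / d := by
    by_contra hcon
    have h1 : n / d + 1 ≤ n / e := by omega
    have h2 : (n / d + 1) * e ≤ n := (Int.le_ediv_iff_mul_le he0).1 h1
    have h3 : (n / d + 1) * d ≤ (n / d + 1) * e := by
      apply mul_le_mul_of_nonneg_left hde (by omega)
    have h4 : n / d + 1 ≤ n / d := (Int.le_ediv_iff_mul_le hd0).2 (by linarith)
    omega
  omega

theorem sum_mod_eq_SM (n : Int) (hn : 0 ≤ n) : sum_mod n = SM n := by
  have h2 : (0:Int) < 2 := by norm_num
  unfold sum_mod SM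
  rw [show PySem.Int.floordiv n 2 = n / 2 from PySem.Int.floordiv_eq_ediv_of_pos h2,
      show PySem.Int.floordiv (n + 1) 2 = (n + 1) / 2 from PySem.Int.floordiv_eq_ediv_of_pos h2,
      PySem.Int.floordiv_eq_ediv_of_pos h2]
  rw [sum_pyRange_map]
  have e1 : n / 2 + 1 - 1 = n / 2 := by ring
  rw [e1]
  have hmodc : ∑ x ∈ Finset.Icc 1 (n / 2), PySem.Int.mod n x = ∑ x ∈ Finset.Icc 1 (n / 2), n % x := by
    refine Finset.sum_congr rfl (fun x hx => ?_)
    obtain ⟨hx1, hx2⟩ := Finset.mem_Icc.1 hx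
    exact PySem.Int.mod_eq_emod_of_pos (by omega)
  rw [hmodc]
  have hq0 : 0 ≤ n / 2 := Int.ediv_nonneg hn (by norm_num)
  have hqn : n / 2 ≤ n := Int.ediv_le_self _ hn
  have hh : (n + 1) / 2 = n - n / 2 := by
    have ha := Int.ediv_add_emod (n + 1) 2
    have hb := Int.ediv_add_emod n 2
    have hc : 0 ≤ (n + 1) % 2 := Int.emod_nonneg _ (by norm_num)
    have hd : (n + 1) % 2 < 2 := Int.emod_lt_of_pos _ h2
    have he : 0 ≤ n % 2 := Int.emod_nonneg _ (by norm_num)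
    have hf : n % 2 < 2 := Int.emod_lt_of_pos _ h2
    omega
  have key : ∑ d ∈ Finset.Icc 1 n, d * (n / d) = ∑ d ∈ Finset.Icc 1 n, (n - n % d) := by
    refine Finset.sum_congr rfl (fun d hd => ?_)
    obtain ⟨hd1, hd2⟩ := Finset.mem_Icc.1 hd
    have hmd := Int.emod_def n d
    linarith [hmd]
  rw [key, Finset.sum_sub_distrib]
  have hcard : ∑ _d ∈ Finset.Icc (1:ℤ) n, n = n * n := by
    rw [Finset.sum_const, Int.card_Icc]
    have : n + 1 - 1 = n := by ring
    rw [this, nsmul_eq_mul, Int.toNat_of_nonneg hn]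
  rw [hcard]
  have hsplit : (∑ x ∈ Finset.Icc 1 (n / 2), n % x) + (∑ x ∈ Finset.Icc (n / 2 + 1) n, n % x)
      = ∑ x ∈ Finset.Icc 1 n, n % x := by
    exact sum_Icc_split _ 1 (n / 2) n (by omega) hqn
  have htop : ∑ x ∈ Finset.Icc (n / 2 + 1) n, n % x = ∑ x ∈ Finset.Icc (n / 2 + 1) n, (n - x) := by
    refine Finset.sum_congr rfl (fun x hx => ?_)
    obtain ⟨hx1, hx2⟩ := Finset.mem_Icc.1 hx
    have hx0 : (0:Int) < x := by omega
    have hdiv1 : n / x = 1 := by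
      have hle : 1 ≤ n / x := (Int.le_ediv_iff_mul_le hx0).2 (by omega)
      have hlt : ¬ (2 ≤ n / x) := by
        intro hcon
        have hcc : 2 * x ≤ n := (Int.le_ediv_iff_mul_le hx0).1 hcon
        omega
      omega
    have hmd := Int.emod_def n x
    rw [hdiv1] at hmd
    linarith [hmd]
  have htop2 : ∑ x ∈ Finset.Icc (n / 2 + 1) n, (n - x)
      = (∑ _x ∈ Finset.Icc (n / 2 + 1) n, n) - ∑ x ∈ Finset.Icc (n / 2 + 1) n, x :=
    Finset.sum_sub_distrib _ _
  have hcard2 : ∑ _x ∈ Finset.Icc (n / 2 + 1) n, n = (n - n / 2) * n := by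
    rw [Finset.sum_const, Int.card_Icc]
    have : n + 1 - (n / 2 + 1) = n - n / 2 := by ring
    rw [this, nsmul_eq_mul, Int.toNat_of_nonneg (by omega)]
  have hG := gauss2 (n / 2 + 1) n (by omega)
  have hT : ((n + 1) / 2 * ((n + 1) / 2 - 1)) / 2 * 2 = (n + 1) / 2 * ((n + 1) / 2 - 1) := by
    apply Int.ediv_mul_cancel
    rcases Int.even_or_odd ((n + 1) / 2) with he | ho
    · exact Dvd.dvd.mul_right he.two_dvd _
    · have hev : Even ((n + 1) / 2 - 1) := by
        obtain ⟨k, hk⟩ := ho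
        exact ⟨k, by omega⟩
      exact Dvd.dvd.mul_left hev.two_dvd _
  have hfinal : 2 * (((n + 1) / 2 * ((n + 1) / 2 - 1)) / 2)
      = 2 * ((n - n / 2) * n - ∑ x ∈ Finset.Icc (n / 2 + 1) n, x) := by
    have e2 : 2 * (((n + 1) / 2 * ((n + 1) / 2 - 1)) / 2) = (n + 1) / 2 * ((n + 1) / 2 - 1) := by
      linarith [hT]
    rw [e2, hh]
    linear_combination hG
  linarith [hsplit, htop, htop2, hcard2, hfinal]

theorem blockSigmaGo_eq (k : Nat) : ∀ (n d total : Int), 0 ≤ n → 1 ≤ d → (n + 1 - d).toNat ≤ k →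
    blockSigmaGo k n d total = total + ∑ e ∈ Finset.Icc d n, e * (n / e) := by
  induction k with
  | zero =>
    intro n d total hn hd hk
    have he : Finset.Icc d n = ∅ := Finset.Icc_eq_empty (by omega)
    simp [blockSigmaGo, he]
  | succ k ih =>
    intro n d total hn hd hk
    by_cases hdn : d ≤ n
    · rw [blockSigmaGo, if_pos ⟨hd, hdn⟩]
      have hd0 : (0:Int) < d := by omega
      have hfd : PySem.Int.floordiv n d = n / d := PySem.Int.floordiv_eq_ediv_of_pos hd0
      have hq1 : 1 ≤ n / d := (Int.le_ediv_iff_mul_le hd0).2 (by omega)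
      rw [hfd, PySem.Int.floordiv_eq_ediv_of_pos (by omega : (0:Int) < n / d),
          PySem.Int.floordiv_eq_ediv_of_pos (by norm_num : (0:Int) < 2)]
      have hlast_ge : d ≤ n / (n / d) := by
        have h0 := blockSigma_le_step n d hd hdn
        rw [hfd, PySem.Int.floordiv_eq_ediv_of_pos (by omega : (0:Int) < n / d)] at h0
        exact h0
      have hlast_le : n / (n / d) ≤ n := Int.ediv_le_self _ hn
      set q := n / d with hqdef
      set last := n / q with hlastdef
      rw [ih n (last + 1) _ hn (by omega) (by omega)]
      have hgauss := gauss2 d last (by omega)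
      have hconst : ∀ e ∈ Finset.Icc d last, e * (n / e) = e * q := by
        intro e he
        obtain ⟨h1e, h2e⟩ := Finset.mem_Icc.1 he
        rw [ediv_block_const n d e hd hdn h1e h2e]
      have hblock : ∑ e ∈ Finset.Icc d last, e * (n / e) = (∑ e ∈ Finset.Icc d last, e) * q := by
        rw [Finset.sum_congr rfl hconst, ← Finset.sum_mul]
      have hhalf : q * (d + last) * (last - d + 1) / 2 = (∑ e ∈ Finset.Icc d last, e) * q := by
        have h1 : q * (d + last) * (last - d + 1) = 2 * ((∑ e ∈ Finset.Icc d last, e) * q) := by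
          linear_combination (-q) * hgauss
        rw [h1, Int.mul_ediv_cancel_left _ (by norm_num : (2:Int) ≠ 0)]
      have hsplitsum : (∑ e ∈ Finset.Icc d last, e * (n / e))
          + (∑ e ∈ Finset.Icc (last + 1) n, e * (n / e)) = ∑ e ∈ Finset.Icc d n, e * (n / e) := by
        exact sum_Icc_split _ d last n (by omega) hlast_le
      linarith [hblock, hhalf, hsplitsum]
    · rw [blockSigmaGo, if_neg (by omega : ¬ (1 ≤ d ∧ d ≤ n))]
      have he : Finset.Icc d n = ∅ := Finset.Icc_eq_empty (by omega)
      simp [he]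

theorem blockSigma_eq (n : Int) (hn : 0 ≤ n) : blockSigma n = SM n := by
  unfold blockSigma SM
  rw [blockSigmaGo_eq (n.toNat + 1) n 1 0 hn (by omega) (by omega), zero_add]

theorem sq_lt_of_sqrt_lt (m : Nat) (i : Int) (h : (m.sqrt : Int) < i) : (m : Int) < i * i := by
  have h1 : ((m.sqrt : Int) + 1) ≤ i := by omega
  have h0 : (0:Int) ≤ (m.sqrt : Int) + 1 := by positivity
  have hm : (m : Int) < ((m.sqrt : Int) + 1) * ((m.sqrt : Int) + 1) := by
    exact_mod_cast Nat.lt_succ_sqrt m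
  calc (m : Int) < ((m.sqrt : Int) + 1) * ((m.sqrt : Int) + 1) := hm
    _ ≤ i * i := mul_le_mul h1 h1 h0 (by omega)

theorem sq_le_of_le_sqrt (m : Nat) (i : Int) (h0 : 0 ≤ i) (h : i ≤ (m.sqrt : Int)) :
    i * i ≤ (m : Int) := by
  have h1 : i.toNat ≤ m.sqrt := by omega
  have h2 : i.toNat * i.toNat ≤ m := Nat.le_sqrt.1 h1
  calc i * i = ((i.toNat * i.toNat : Nat) : Int) := by
        push_cast [Int.toNat_of_nonneg h0]; ring
    _ ≤ (m : Int) := by exact_mod_cast h2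

theorem gz_i_large (L i j : Int) (hL : 1 ≤ L) (hj : 1 ≤ j) (h : find_max_ij L < i) :
    gTerm L i j = 0 := by
  unfold gTerm
  rw [if_neg]
  rintro ⟨-, hle⟩
  unfold find_max_ij at h
  have h1 : (((L - 1).toNat : Nat) : Int) < i * i := sq_lt_of_sqrt_lt _ _ h
  rw [Int.toNat_of_nonneg (by omega)] at h1
  have h2 : 1 ≤ j * j := one_le_sq j hj
  linarith

theorem gz_j_large (L i j : Int) (hL : 1 ≤ L) (hji : j ≤ i)
    (h : (((PySem.Int.floordiv L 2).toNat : Nat).sqrt : Int) < j) : gTerm L i j = 0 := by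
  unfold gTerm
  rw [if_neg]
  rintro ⟨-, hle⟩
  rw [PySem.Int.floordiv_eq_ediv_of_pos (by norm_num : (0:Int) < 2)] at h
  have h1 : (((L / 2).toNat : Nat) : Int) < j * j := sq_lt_of_sqrt_lt _ _ h
  have h2 : 0 ≤ L / 2 := Int.ediv_nonneg (by omega) (by norm_num)
  rw [Int.toNat_of_nonneg h2] at h1
  have hrel := Int.ediv_add_emod L 2
  have hr0 : 0 ≤ L % 2 := Int.emod_nonneg _ (by norm_num)
  have hr1 : L % 2 < 2 := Int.emod_lt_of_pos _ (by norm_num)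
  have hj0 : 0 ≤ j := by
    have : (0:Int) ≤ (((L / 2).toNat : Nat).sqrt : Int) := by positivity
    omega
  have hii : j * j ≤ i * i := mul_le_mul hji hji hj0 (by omega)
  linarith

theorem gz_i_inner (L i j : Int) (hj : 1 ≤ j) (hjL : j * j ≤ L)
    (h : (((L - j * j).toNat : Nat).sqrt : Int) < i) : gTerm L i j = 0 := by
  unfold gTerm
  rw [if_neg]
  rintro ⟨-, hle⟩
  have h1 : (((L - j * j).toNat : Nat) : Int) < i * i := sq_lt_of_sqrt_lt _ _ h
  rw [Int.toNat_of_nonneg (by omega)] at h1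
  linarith

theorem termA_eq_g (L i j : Int) (hL : 0 ≤ L) (hi : 1 ≤ i) (hj : 1 ≤ j)
    (hg : Int.gcd i j = 1) (hs : i * i + j * j ≤ L) :
    find_imaginary_num_from_root_ij L i j = gTerm L i j := by
  unfold find_imaginary_num_from_root_ij gTerm
  have hpow : i ^ 2 + j ^ 2 = i * i + j * j := by ring
  rw [hpow]
  have hs0 : (0:Int) < i * i + j * j := by
    have := one_le_sq i hi
    have := one_le_sq j hj
    linarith
  rw [PySem.Int.floordiv_eq_ediv_of_pos hs0,
      if_pos (show Int.gcd i j = 1 ∧ i * i + j * j ≤ L from ⟨hg, hs⟩)]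
  show (if (i == j) = true then sum_mod (L / (i * i + j * j)) * 2 * i
      else sum_mod (L / (i * i + j * j)) * 2 * (i + j))
    = SM (L / (i * i + j * j)) * if i = j then 2 * i else 2 * (i + j)
  rw [sum_mod_eq_SM _ (Int.ediv_nonneg hL (by omega))]
  simp only [beq_iff_eq]
  by_cases hij : i = j
  · rw [if_pos hij, if_pos hij]; ring
  · rw [if_neg hij, if_neg hij]; ring

theorem innerA_eq (L i : Int) (hL : 0 ≤ L) (hi : 1 ≤ i) :
    ∀ (k : Nat) (j0 acc : Int), 1 ≤ j0 → (i + 1 - j0).toNat ≤ k →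
      innerA L i (PySem.List.pyRange j0 (i + 1) 1) acc = acc + ∑ j ∈ Finset.Icc j0 i, gTerm L i j := by
  intro k
  induction k with
  | zero =>
    intro j0 acc hj0 hk
    rw [PySem.List.pyRange_one_eq_nil (by omega)]
    have he : Finset.Icc j0 i = ∅ := Finset.Icc_eq_empty (by omega)
    simp [innerA, he]
  | succ k ih =>
    intro j0 acc hj0 hk
    by_cases hj0i : j0 ≤ i
    · rw [PySem.List.pyRange_one_cons (by omega : j0 < i + 1)]
      simp only [innerA]
      by_cases hg : Int.gcd i j0 = 1
      · have hgb : (Int.gcd i j0 == 1) = true := by simp [hg]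
        rw [hgb]
        simp only [if_true]
        by_cases hbig : i ^ 2 + j0 ^ 2 > L
        · rw [if_pos hbig]
          have hz : ∑ j ∈ Finset.Icc j0 i, gTerm L i j = 0 := by
            refine Finset.sum_eq_zero (fun j hj => ?_)
            obtain ⟨hja, hjb⟩ := Finset.mem_Icc.1 hj
            unfold gTerm
            rw [if_neg]
            rintro ⟨-, hcond⟩
            have hsq : j0 * j0 ≤ j * j := mul_le_mul hja hja (by omega) (by omega)
            have hbig' : i * i + j0 * j0 > L := by
              have hp : i ^ 2 = i * i := by ring
              have hp2 : j0 ^ 2 = j0 * j0 := by ring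
              rw [hp, hp2] at hbig
              exact hbig
            linarith
          rw [hz, add_zero]
        · rw [if_neg hbig]
          rw [ih (j0 + 1) (acc + find_imaginary_num_from_root_ij L i j0) (by omega) (by omega)]
          have hterm : find_imaginary_num_from_root_ij L i j0 = gTerm L i j0 := by
            apply termA_eq_g L i j0 hL hi hj0 hg
            have hp : i ^ 2 = i * i := by ring
            have hp2 : j0 ^ 2 = j0 * j0 := by ring
            rw [hp, hp2] at hbig
            omega
          rw [Icc_insert_bot j0 i hj0i, Finset.sum_insert (by simp only [Finset.mem_Icc, not_and, not_le]; omega)]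
          rw [hterm]
          ring
      · have hgb : (Int.gcd i j0 == 1) = false := by simp [hg]
        rw [hgb]
        simp only [Bool.false_eq_true, if_false]
        rw [ih (j0 + 1) acc (by omega) (by omega)]
        have hz : gTerm L i j0 = 0 := by
          unfold gTerm
          rw [if_neg]
          rintro ⟨h1, -⟩
          exact hg h1
        rw [Icc_insert_bot j0 i hj0i, Finset.sum_insert (by simp only [Finset.mem_Icc, not_and, not_le]; omega), hz]
        ring
    · rw [PySem.List.pyRange_one_eq_nil (by omega)]
      have he : Finset.Icc j0 i = ∅ := Finset.Icc_eq_empty (by omega)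
      simp [innerA, he]

theorem A_eq (L : Int) (hL : 1 ≤ L) :
    find_imaginary_solution_num L
      = ∑ i ∈ Finset.Icc 1 (find_max_ij L), ∑ j ∈ Finset.Icc 1 i, gTerm L i j := by
  unfold find_imaginary_solution_num
  rw [PySem.List.foldl_congr_mem _ _
      (fun acc i => acc + ∑ j ∈ Finset.Icc 1 i, gTerm L i j) 0
      (by
        intro acc i hi
        obtain ⟨hi1, -⟩ := PySem.List.mem_pyRange_one.1 hi
        exact innerA_eq L i (by omega) hi1 (i + 1 - 1).toNat 1 acc (by omega) (by omega))]
  rw [PySem.List.foldl_add, sum_pyRange_map, zero_add]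
  have h1 : find_max_ij L + 1 - 1 = find_max_ij L := by ring
  rw [h1]

theorem B_eq (L : Int) (hL : 1 ≤ L) :
    find_imaginary_solution_num_alt L
      = ∑ j ∈ Finset.Icc 1 (((PySem.Int.floordiv L 2).toNat.sqrt : Int)),
          ∑ i ∈ Finset.Icc j (((L - j * j).toNat.sqrt : Int)), gTerm L i j := by
  unfold find_imaginary_solution_num_alt
  rw [PySem.List.foldl_congr_mem _ _
      (fun acc j => acc + ∑ i ∈ Finset.Icc j (((L - j * j).toNat.sqrt : Int)), gTerm L i j) 0
      (by
        intro acc j hj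
        obtain ⟨hj1, hj2⟩ := PySem.List.mem_pyRange_one.1 hj
        -- j² ≤ L
        have hLq : 0 ≤ PySem.Int.floordiv L 2 := by
          rw [PySem.Int.floordiv_eq_ediv_of_pos (by norm_num : (0:Int) < 2)]
          exact Int.ediv_nonneg (by omega) (by norm_num)
        have hjq : j * j ≤ PySem.Int.floordiv L 2 := by
          have := sq_le_of_le_sqrt (PySem.Int.floordiv L 2).toNat j (by omega) (by omega)
          rwa [Int.toNat_of_nonneg hLq] at this
        have hjL : j * j ≤ L := by
          rw [PySem.Int.floordiv_eq_ediv_of_pos (by norm_num : (0:Int) < 2)] at hjq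
          have := Int.ediv_le_self 2 (show (0:Int) ≤ L by omega)
          calc j * j ≤ L / 2 := hjq
            _ ≤ L := Int.ediv_le_self _ (by omega)
        rw [PySem.List.foldl_congr_mem _ _ (fun acc2 i => acc2 + gTerm L i j) acc
            (by
              intro acc2 i hi
              obtain ⟨hij, hi2⟩ := PySem.List.mem_pyRange_one.1 hi
              have hiL : i * i + j * j ≤ L := by
                have hnn : 0 ≤ L - j * j := by omega
                have := sq_le_of_le_sqrt (L - j * j).toNat i (by omega) (by omega)
                rw [Int.toNat_of_nonneg hnn] at this
                omega
              by_cases hg : Int.gcd i j = 1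
              · have hgb : (Int.gcd i j == 1) = true := by simp [hg]
                rw [hgb]
                simp only [if_true]
                have hs0 : (0:Int) < i * i + j * j := by
                  have := one_le_sq j hj1
                  have := one_le_sq i (by omega : 1 ≤ i)
                  linarith
                rw [PySem.Int.floordiv_eq_ediv_of_pos hs0,
                    blockSigma_eq _ (Int.ediv_nonneg (by omega) (by omega))]
                unfold gTerm
                rw [if_pos (show Int.gcd i j = 1 ∧ i * i + j * j ≤ L from ⟨hg, hiL⟩)]
                simp only [beq_iff_eq]
              · have hgb : (Int.gcd i j == 1) = false := by simp [hg]
                rw [hgb]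
                simp only [Bool.false_eq_true, if_false]
                have hz : gTerm L i j = 0 := by
                  unfold gTerm
                  rw [if_neg]
                  rintro ⟨h1, -⟩
                  exact hg h1
                rw [hz, add_zero])]
        rw [PySem.List.foldl_add, sum_pyRange_map]
        have h1 : ((L - j * j).toNat.sqrt : Int) + 1 - 1 = ((L - j * j).toNat.sqrt : Int) := by ring
        rw [h1])]
  rw [PySem.List.foldl_add, sum_pyRange_map, zero_add]
  have h1 : ((PySem.Int.floordiv L 2).toNat.sqrt : Int) + 1 - 1
      = ((PySem.Int.floordiv L 2).toNat.sqrt : Int) := by ring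
  rw [h1]

theorem sum_A_ext (L : Int) (hL : 1 ≤ L) :
    ∑ i ∈ Finset.Icc 1 (find_max_ij L), ∑ j ∈ Finset.Icc 1 i, gTerm L i j
      = ∑ i ∈ Finset.Icc 1 (NL L), ∑ j ∈ Finset.Icc 1 i, gTerm L i j := by
  apply Finset.sum_subset
  · apply Finset.Icc_subset_Icc le_rfl
    unfold find_max_ij NL
    have h1 : (L - 1).toNat ≤ L.toNat := by omega
    exact_mod_cast Nat.sqrt_le_sqrt h1
  · intro i hi hni
    obtain ⟨hi1, hi2⟩ := Finset.mem_Icc.1 hi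
    have hMA : find_max_ij L < i := by
      by_contra hc
      exact hni (Finset.mem_Icc.2 ⟨hi1, by omega⟩)
    refine Finset.sum_eq_zero (fun j hj => ?_)
    obtain ⟨hj1, -⟩ := Finset.mem_Icc.1 hj
    exact gz_i_large L i j hL hj1 hMA

theorem sum_B_ext (L : Int) (hL : 1 ≤ L) :
    ∑ j ∈ Finset.Icc 1 (((PySem.Int.floordiv L 2).toNat.sqrt : Int)),
        ∑ i ∈ Finset.Icc j (((L - j * j).toNat.sqrt : Int)), gTerm L i j
      = ∑ j ∈ Finset.Icc 1 (NL L), ∑ i ∈ Finset.Icc j (NL L), gTerm L i j := by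
  have hL0 : (0:Int) ≤ L := by omega
  have hinner : ∀ j ∈ Finset.Icc (1:ℤ) (((PySem.Int.floordiv L 2).toNat.sqrt : Int)),
      ∑ i ∈ Finset.Icc j (((L - j * j).toNat.sqrt : Int)), gTerm L i j
        = ∑ i ∈ Finset.Icc j (NL L), gTerm L i j := by
    intro j hj
    obtain ⟨hj1, hj2⟩ := Finset.mem_Icc.1 hj
    have hLq : 0 ≤ PySem.Int.floordiv L 2 := by
      rw [PySem.Int.floordiv_eq_ediv_of_pos (by norm_num : (0:Int) < 2)]
      exact Int.ediv_nonneg hL0 (by norm_num)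
    have hjq : j * j ≤ PySem.Int.floordiv L 2 := by
      have := sq_le_of_le_sqrt (PySem.Int.floordiv L 2).toNat j (by omega) (by omega)
      rwa [Int.toNat_of_nonneg hLq] at this
    have hjL : j * j ≤ L := by
      rw [PySem.Int.floordiv_eq_ediv_of_pos (by norm_num : (0:Int) < 2)] at hjq
      calc j * j ≤ L / 2 := hjq
        _ ≤ L := Int.ediv_le_self _ hL0
    apply Finset.sum_subset
    · apply Finset.Icc_subset_Icc le_rfl
      unfold NL
      have h1 : (L - j * j).toNat ≤ L.toNat := by
        have : 0 ≤ j * j := by positivity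
        omega
      exact_mod_cast Nat.sqrt_le_sqrt h1
    · intro i hi hni
      obtain ⟨hij, hiN⟩ := Finset.mem_Icc.1 hi
      have hBI : ((L - j * j).toNat.sqrt : Int) < i := by
        by_contra hc
        exact hni (Finset.mem_Icc.2 ⟨hij, by omega⟩)
      exact gz_i_inner L i j hj1 hjL hBI
  rw [Finset.sum_congr rfl hinner]
  apply Finset.sum_subset
  · apply Finset.Icc_subset_Icc le_rfl
    unfold NL
    have h1 : (PySem.Int.floordiv L 2).toNat ≤ L.toNat := by
      rw [PySem.Int.floordiv_eq_ediv_of_pos (by norm_num : (0:Int) < 2)]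
      have := Int.ediv_le_self 2 hL0
      omega
    exact_mod_cast Nat.sqrt_le_sqrt h1
  · intro j hj hnj
    obtain ⟨hj1, hj2⟩ := Finset.mem_Icc.1 hj
    have hMB : ((PySem.Int.floordiv L 2).toNat.sqrt : Int) < j := by
      by_contra hc
      exact hnj (Finset.mem_Icc.2 ⟨hj1, by omega⟩)
    refine Finset.sum_eq_zero (fun i hi => ?_)
    obtain ⟨hij, -⟩ := Finset.mem_Icc.1 hi
    exact gz_j_large L i j hL hij hMB

theorem sum_swap_tri (g : Int → Int → Int) (N : Int) :
    ∑ i ∈ Finset.Icc 1 N, ∑ j ∈ Finset.Icc 1 i, g i j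
      = ∑ j ∈ Finset.Icc 1 N, ∑ i ∈ Finset.Icc j N, g i j := by
  have L1 : ∀ i ∈ Finset.Icc (1:ℤ) N,
      ∑ j ∈ Finset.Icc 1 i, g i j = ∑ j ∈ Finset.Icc 1 N, if j ≤ i then g i j else 0 := by
    intro i hi
    obtain ⟨hi1, hiN⟩ := Finset.mem_Icc.1 hi
    rw [← Finset.sum_filter]
    congr 1
    ext x
    simp only [Finset.mem_Icc, Finset.mem_filter]
    omega
  have L2 : ∀ j ∈ Finset.Icc (1:ℤ) N,
      ∑ i ∈ Finset.Icc j N, g i j = ∑ i ∈ Finset.Icc 1 N, if j ≤ i then g i j else 0 := by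
    intro j hj
    obtain ⟨hj1, hjN⟩ := Finset.mem_Icc.1 hj
    rw [← Finset.sum_filter]
    congr 1
    ext x
    simp only [Finset.mem_Icc, Finset.mem_filter]
    omega
  calc ∑ i ∈ Finset.Icc 1 N, ∑ j ∈ Finset.Icc 1 i, g i j
      = ∑ i ∈ Finset.Icc 1 N, ∑ j ∈ Finset.Icc 1 N, if j ≤ i then g i j else 0 :=
        Finset.sum_congr rfl L1
    _ = ∑ j ∈ Finset.Icc 1 N, ∑ i ∈ Finset.Icc 1 N, if j ≤ i then g i j else 0 :=
        Finset.sum_comm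
    _ = ∑ j ∈ Finset.Icc 1 N, ∑ i ∈ Finset.Icc j N, g i j :=
        (Finset.sum_congr rfl L2).symm

-- ===== VERDICT (by name: the statement is the Claim_ definition above) =====
theorem find_imaginary_solution_num_spec : Claim_equal_find_imaginary_solution_num := by
  intro L _ hpre
  unfold Pre_find_imaginary_solution_num at hpre
  unfold Spec_find_imaginary_solution_num
  rw [A_eq L hpre, B_eq L hpre, sum_A_ext L hpre, sum_B_ext L hpre]
  exact sum_swap_tri (fun i j => gTerm L i j) (NL L)
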